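-- pv_equiv track=rewrite | github.com/michelle-madrid/amsa-weekly-report | core/extractores.py | extraer_detalle_fases
-- ===== SOURCE A (Python) =====
-- def extraer_detalle_fases(texto):
--     seccion = []
--     capturar = False
--     for linea in texto.split("\n"):
--         if linea.startswith("Detalle por fases"):
--             capturar = True
--             continue
--         if capturar:
--             if linea.startswith("Planta") or linea.startswith("Planta:"):
--                 break
--             seccion.append(linea.strip())
--     return seccion
-- ===== SOURCE B (Python) =====
-- def extraer_detalle_fases(texto):
--     lines = texto.split("\n")
--     start = next((k + 1 for k, l in enumerate(lines)
--                   if l.startswith("Detalle por fases")), None)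
--     if start is None:
--         return []
--     rest = lines[start:]
--     end = next((k for k, l in enumerate(rest) if l.startswith("Planta")), len(rest))
--     return [l.strip() for l in rest[:end]
--             if not l.startswith("Detalle por fases")]
-- ===== Notes on version B (the rewrite author's own statement) =====
-- stated objective: idiomatic
-- what changed: Replaced the running capture flag and break with a find-index/slice decomposition: locate the first marker line, slice off everything before and up to it, cut at the first 'Planta' line, and build the result as one comprehension (repeated marker lines are filtered, as A skips them).
import Mathlib
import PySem

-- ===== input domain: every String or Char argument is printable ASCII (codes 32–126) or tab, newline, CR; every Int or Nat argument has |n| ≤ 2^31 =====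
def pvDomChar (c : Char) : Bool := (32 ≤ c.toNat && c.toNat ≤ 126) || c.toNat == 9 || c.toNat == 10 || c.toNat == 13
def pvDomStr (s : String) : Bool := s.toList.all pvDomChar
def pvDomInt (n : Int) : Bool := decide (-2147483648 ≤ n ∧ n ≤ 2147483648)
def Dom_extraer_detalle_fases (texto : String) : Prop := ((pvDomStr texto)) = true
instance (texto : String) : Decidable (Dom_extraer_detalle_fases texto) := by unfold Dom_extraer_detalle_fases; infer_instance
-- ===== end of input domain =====

-- B replaces A's running capture flag by a find-index/slice/comprehension decomposition (idiomatic; same cost).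

-- ===== PORT A =====
-- the for-loop with its (seccion, capturar) state and break, as structural recursion
def pvLoopA : List String → List String → Bool → List String
  | [], seccion, _ => seccion
  | linea :: rest, seccion, capturar =>
    if PySem.Str.startswith linea "Detalle por fases" then
      pvLoopA rest seccion true
    else if capturar then
      if PySem.Str.startswith linea "Planta" || PySem.Str.startswith linea "Planta:" then
        seccion
      else
        pvLoopA rest (seccion ++ [PySem.Str.strip linea]) capturar
    else
      pvLoopA rest seccion capturar

-- split? is exact here: its sep "\n" is a nonempty literal, so it is never none
def extraer_detalle_fases (texto : String) : List String :=
  pvLoopA ((PySem.Str.split? texto "\n").getD []) [] false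

-- ===== PORT B =====
def extraer_detalle_fases_alt (texto : String) : List String :=
  let lines := (PySem.Str.split? texto "\n").getD []
  match lines.findIdx? (fun l => PySem.Str.startswith l "Detalle por fases") with
  | none => []
  | some k =>
    let rest := lines.drop (k + 1)
    let stop := (rest.findIdx? (fun l => PySem.Str.startswith l "Planta")).getD rest.length
    ((rest.take stop).filter (fun l => !PySem.Str.startswith l "Detalle por fases")).map
      PySem.Str.strip

-- ===== PRECONDITION & SPEC =====
def Spec_extraer_detalle_fases (texto : String) (out : List String) : Prop := out = extraer_detalle_fases_alt texto
instance (texto : String) (out : List String) : Decidable (Spec_extraer_detalle_fases texto out) := by unfold Spec_extraer_detalle_fases; infer_instance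

-- ===== CLAIM (what is proved, stated in full; the proofs are below) =====
def Claim_equal_extraer_detalle_fases : Prop := ∀ (texto : String), Dom_extraer_detalle_fases texto → Spec_extraer_detalle_fases texto (extraer_detalle_fases texto)

-- ===== LEMMAS AND PROOFS =====

-- the capture phase of B, as a function of the lines after the marker
def pvCaptureB (rest : List String) : List String :=
  let stop := (rest.findIdx? (fun l => PySem.Str.startswith l "Planta")).getD rest.length
  ((rest.take stop).filter (fun l => !PySem.Str.startswith l "Detalle por fases")).map
    PySem.Str.strip

-- no line starts with both "Detalle por fases" and "Planta"
theorem pv_not_both (l : String)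
    (h1 : PySem.Str.startswith l "Detalle por fases" = true)
    (h2 : PySem.Str.startswith l "Planta" = true) : False := by
  rw [PySem.Str.startswith_eq, PySem.Chars.startswith_iff] at h1 h2
  obtain ⟨t1, ht1⟩ := h1
  obtain ⟨t2, ht2⟩ := h2
  rw [← ht2] at ht1
  simp at ht1

-- a line starting with "Planta:" starts with "Planta"
theorem pv_planta_colon (l : String)
    (hq : PySem.Str.startswith l "Planta:" = true) :
    PySem.Str.startswith l "Planta" = true := by
  rw [PySem.Str.startswith_eq, PySem.Chars.startswith_iff] at hq ⊢
  exact List.IsPrefix.trans (by decide) hq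

theorem pvCaptureB_cons_marker (l : String) (rest : List String)
    (hm : PySem.Str.startswith l "Detalle por fases" = true) :
    pvCaptureB (l :: rest) = pvCaptureB rest := by
  have hp : PySem.Str.startswith l "Planta" = false := by
    cases hpl : PySem.Str.startswith l "Planta" with
    | false => rfl
    | true => exact absurd (pv_not_both l hm hpl) (by simp)
  have hm' := hm; simp at hm'
  simp only [pvCaptureB, List.findIdx?_cons, hp]
  cases rest.findIdx? (fun l => PySem.Str.startswith l "Planta") <;>
    simp [hm']

theorem pvCaptureB_cons_planta (l : String) (rest : List String)
    (hp : PySem.Str.startswith l "Planta" = true) :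
    pvCaptureB (l :: rest) = [] := by
  simp only [pvCaptureB, List.findIdx?_cons, hp]
  simp

theorem pvCaptureB_cons_keep (l : String) (rest : List String)
    (hm : PySem.Str.startswith l "Detalle por fases" = false)
    (hp : PySem.Str.startswith l "Planta" = false) :
    pvCaptureB (l :: rest) = PySem.Str.strip l :: pvCaptureB rest := by
  have hm' := hm; simp at hm'
  simp only [pvCaptureB, List.findIdx?_cons, hp]
  cases rest.findIdx? (fun l => PySem.Str.startswith l "Planta") <;>
    simp [hm']

theorem pvLoopA_true (rest : List String) (acc : List String) :
    pvLoopA rest acc true = acc ++ pvCaptureB rest := by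
  induction rest generalizing acc with
  | nil => simp [pvLoopA, pvCaptureB]
  | cons l rs ih =>
    by_cases hm : PySem.Str.startswith l "Detalle por fases" = true
    · rw [pvLoopA, if_pos hm, ih, pvCaptureB_cons_marker l rs hm]
    · rw [Bool.not_eq_true] at hm
      by_cases hp : PySem.Str.startswith l "Planta" = true
      · rw [pvLoopA, if_neg (by rw [hm]; simp), if_pos rfl,
          if_pos (by rw [hp]; simp), pvCaptureB_cons_planta l rs hp, List.append_nil]
      · rw [Bool.not_eq_true] at hp
        have hp' : PySem.Str.startswith l "Planta:" = false := by
          cases hq : PySem.Str.startswith l "Planta:" with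
          | false => rfl
          | true => rw [pv_planta_colon l hq] at hp; exact absurd hp (by simp)
        rw [pvLoopA, if_neg (by rw [hm]; simp), if_pos rfl,
          if_neg (by rw [hp, hp']; simp), ih, pvCaptureB_cons_keep l rs hm hp]
        simp

theorem pv_main (lines : List String) :
    pvLoopA lines [] false =
      (match lines.findIdx? (fun l => PySem.Str.startswith l "Detalle por fases") with
        | none => []
        | some k => pvCaptureB (lines.drop (k + 1))) := by
  induction lines with
  | nil => simp [pvLoopA]
  | cons l rs ih =>
    by_cases hm : PySem.Str.startswith l "Detalle por fases" = true
    · rw [pvLoopA, if_pos hm, pvLoopA_true]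
      simp only [List.findIdx?_cons, hm]
      simp
    · rw [Bool.not_eq_true] at hm
      rw [pvLoopA, if_neg (by rw [hm]; simp), if_neg (by simp), ih]
      simp only [List.findIdx?_cons, hm]
      cases rs.findIdx? (fun l => PySem.Str.startswith l "Detalle por fases") <;> simp

-- ===== VERDICT (by name: the statement is the Claim_ definition above) =====
theorem extraer_detalle_fases_spec : Claim_equal_extraer_detalle_fases := by
  intro texto _
  unfold Spec_extraer_detalle_fases extraer_detalle_fases extraer_detalle_fases_alt
  rw [pv_main]
  cases h : ((PySem.Str.split? texto "\n").getD []).findIdx?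
      (fun l => PySem.Str.startswith l "Detalle por fases") with
  | none => simp only [h]
  | some k => simp only [h]; simp [pvCaptureB]
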